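-- pv_equiv track=rewrite | github.com/yeshwanthh17/python-fundamentals-projects | text_analyzer/main.py | least_frequent_word
-- ===== SOURCE A (Python) =====
-- def word_frequency(text):
--     freq = {}
--     text = text.lower()
--     word = ""
--
--     for ch in text:
--         if ch.isalpha():
--             word = word + ch
--         else:
--             if word != "":
--                 if word in freq:
--                     freq[word] = freq[word] + 1
--                 else:
--                     freq[word] = 1
--                 word = ""
--
--     if word != "":
--         if word in freq:
--             freq[word] = freq[word] + 1
--         else:
--             freq[word] = 1
--
--     return freq
--
-- def least_frequent_word(text):
--     freq = word_frequency(text)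
--     min_word = ""
--     min_count = None
--
--     for word in freq:
--         if min_count is None or freq[word] < min_count:
--             min_count = freq[word]
--             min_word = word
--
--     return min_word
-- ===== SOURCE B (Python) =====
-- def least_frequent_word(text):
--     t = text.lower()
--     n = len(t)
--     words = []
--     i = 0
--     while i < n:
--         if t[i].isalpha():
--             j = i
--             while j < n and t[j].isalpha():
--                 j += 1
--             words.append(t[i:j])
--             i = j
--         else:
--             i += 1
--     freq = {}
--     for w in words:
--         freq[w] = freq.get(w, 0) + 1
--     if not freq:
--         return ""
--     return min(freq, key=freq.get)
-- ===== Notes on version B (the rewrite author's own statement) =====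
-- stated objective: idiomatic
-- what changed: Replaces the per-character accumulator loop and the manual min-scan with a two-pointer maximal-run tokenizer that slices whole words, a counting dict built with dict.get, and the builtin min(freq, key=freq.get) for the first-seen least-frequent word.
import Mathlib
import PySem

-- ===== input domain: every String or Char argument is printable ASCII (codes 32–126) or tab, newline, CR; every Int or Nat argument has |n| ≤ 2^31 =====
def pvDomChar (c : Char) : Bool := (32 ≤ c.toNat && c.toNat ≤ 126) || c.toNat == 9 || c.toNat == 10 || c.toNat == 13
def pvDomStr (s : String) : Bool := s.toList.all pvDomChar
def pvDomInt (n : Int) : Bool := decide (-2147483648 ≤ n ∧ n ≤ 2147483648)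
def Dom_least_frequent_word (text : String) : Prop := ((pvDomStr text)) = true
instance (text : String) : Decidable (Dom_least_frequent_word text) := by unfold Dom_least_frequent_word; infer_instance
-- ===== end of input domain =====

-- B replaces A's per-character accumulator loop and manual min-scan with a two-pointer
-- maximal-run tokenizer, a get-based counting dict and a first-minimizer min over the keys
-- (objective: idiomatic; same O(n) cost).


-- ===== PORT A =====
-- 'if word in freq: freq[word] += 1 else: freq[word] = 1' (words as List Char, counts as Int)
def lfwBump (d : PySem.Dict (List Char) Int) (w : List Char) : PySem.Dict (List Char) Int :=
  if d.contains w then d.insert w (d.getD w 0 + 1) else d.insert w 1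

-- the 'for ch in text' loop of word_frequency, state = (freq, word)
def lfwLoop (d : PySem.Dict (List Char) Int) (w : List Char) :
    List Char → PySem.Dict (List Char) Int × List Char
  | [] => (d, w)
  | c :: cs =>
    if PySem.Chars.isalpha c then lfwLoop d (w ++ [c]) cs
    else if w ≠ [] then lfwLoop (lfwBump d w) [] cs
    else lfwLoop d w cs

-- word_frequency(text): run the loop on text.lower(), then the trailing flush
def lfwWordFrequency (text : String) : PySem.Dict (List Char) Int :=
  let st := lfwLoop PySem.Dict.empty [] (PySem.Chars.lower text.toList)
  if st.2 ≠ [] then lfwBump st.1 st.2 else st.1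

-- the 'for word in freq' min-scan, state = (min_word, min_count)
def least_frequent_word (text : String) : String :=
  let freq := lfwWordFrequency text
  let st := freq.keys.foldl
    (fun (st : List Char × Option Int) w =>
      match st.2 with
      | none => (w, some (freq.getD w 0))
      | some m => if freq.getD w 0 < m then (w, some (freq.getD w 0)) else st)
    ([], none)
  String.ofList st.1

-- ===== PORT B =====
-- outer 'while i < n' of B's tokenizer; the slice t[i:j] produced by the inner
-- 'while j < n and t[j].isalpha(); j += 1' IS the takeWhile run of the suffix at i,
-- and 'i = j' advances i by that run's length
def lfwTok (t : List Char) (i : Nat) : List (List Char) :=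
  if h : i < t.length then
    if PySem.Chars.isalpha t[i] then
      ((t.drop i).takeWhile PySem.Chars.isalpha)
        :: lfwTok t (i + ((t.drop i).takeWhile PySem.Chars.isalpha).length)
    else lfwTok t (i + 1)
  else []
termination_by t.length - i
decreasing_by
  · have hd : t[i] :: t.drop (i + 1) = t.drop i := List.getElem_cons_drop ..
    have h2 : 0 < ((t.drop i).takeWhile PySem.Chars.isalpha).length := by
      rw [← hd, List.takeWhile_cons]
      simp_all
    omega
  · omega

def least_frequent_word_alt (text : String) : String :=
  let t := PySem.Chars.lower text.toList
  let words := lfwTok t 0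
  let freq := words.foldl (fun d w => d.insert w (d.getD w 0 + 1))
    (PySem.Dict.empty : PySem.Dict (List Char) Int)
  -- 'if not freq: return ""' then 'min(freq, key=freq.get)': none exactly when freq is empty
  (PySem.List.min? freq.keys (fun w => freq.getD w 0)).elim "" String.ofList

-- ===== PRECONDITION & SPEC =====
def Spec_least_frequent_word (text : String) (out : String) : Prop := out = least_frequent_word_alt text
instance (text : String) (out : String) : Decidable (Spec_least_frequent_word text out) := by unfold Spec_least_frequent_word; infer_instance

-- ===== CLAIM (what is proved, stated in full; the proofs are below) =====
def Claim_equal_least_frequent_word : Prop := ∀ (text : String), Dom_least_frequent_word text → Spec_least_frequent_word text (least_frequent_word text)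

-- ===== LEMMAS AND PROOFS =====

-- A's bump is unconditionally 'insert w (getD w 0 + 1)' (B's counting step)
theorem lfwBump_eq (d : PySem.Dict (List Char) Int) (w : List Char) :
    lfwBump d w = d.insert w (d.getD w 0 + 1) := by
  unfold lfwBump
  by_cases h : d.contains w
  · simp [h]
  · rw [if_neg h, PySem.Dict.getD_of_not_contains d 0 (by simpa using h)]
    norm_num

-- structural tokenizer used only by the proofs (A's pending-word view and B's index view both reduce to it)
def lfwTokL : List Char → List (List Char)
  | [] => []
  | c :: cs =>
    if PySem.Chars.isalpha c then
      (c :: cs.takeWhile PySem.Chars.isalpha) :: lfwTokL (cs.dropWhile PySem.Chars.isalpha)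
    else lfwTokL cs
termination_by cs => cs.length
decreasing_by
  · have := List.length_dropWhile_le (p := PySem.Chars.isalpha) (l := cs)
    simpa [Nat.lt_succ_iff] using this
  · simp

-- A's char loop followed by the trailing flush counts exactly the tokens (pending word w)
theorem lfwLoop_flush (cs : List Char) : ∀ (d : PySem.Dict (List Char) Int) (w : List Char),
    (let st := lfwLoop d w cs; if st.2 ≠ [] then lfwBump st.1 st.2 else st.1)
      = ((if w = [] then lfwTokL cs
          else (w ++ cs.takeWhile PySem.Chars.isalpha) :: lfwTokL (cs.dropWhile PySem.Chars.isalpha))).foldl lfwBump d := by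
  induction cs with
  | nil =>
    intro d w
    by_cases hw : w = [] <;> simp [lfwLoop, lfwTokL, hw]
  | cons c cs ih =>
    intro d w
    by_cases ha : PySem.Chars.isalpha c
    · by_cases hw : w = []
      · subst hw
        simpa [lfwLoop, lfwTokL, ha, List.takeWhile_cons, List.dropWhile_cons] using ih d [c]
      · have h2 : w ++ [c] ≠ [] := by simp
        simpa [lfwLoop, lfwTokL, ha, hw, List.takeWhile_cons, List.dropWhile_cons,
          List.append_assoc] using ih d (w ++ [c])
    · by_cases hw : w = []
      · subst hw
        simpa [lfwLoop, lfwTokL, ha, List.takeWhile_cons, List.dropWhile_cons] using ih d []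
      · simpa [lfwLoop, lfwTokL, ha, hw, List.takeWhile_cons, List.dropWhile_cons,
          List.foldl_cons] using ih (lfwBump d w) []

-- drop past the takeWhile prefix is dropWhile
theorem lfwDropTake (l : List Char) (p : Char → Bool) :
    l.drop (l.takeWhile p).length = l.dropWhile p := by
  induction l with
  | nil => rfl
  | cons c cs ih => by_cases h : p c <;> simp [h, ih]

-- B's index tokenizer is the structural one on the suffix
theorem lfwTok_eq_tokL (t : List Char) (i : Nat) : lfwTok t i = lfwTokL (t.drop i) := by
  induction i using lfwTok.induct t with
  | case1 i h ha ih =>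
    have hd : t[i] :: t.drop (i + 1) = t.drop i := List.getElem_cons_drop ..
    have hrun : (t.drop i).takeWhile PySem.Chars.isalpha
        = t[i] :: (t.drop (i + 1)).takeWhile PySem.Chars.isalpha := by
      rw [← hd, List.takeWhile_cons, if_pos ha]
    have hdrop : t.drop (i + ((t.drop i).takeWhile PySem.Chars.isalpha).length)
        = (t.drop (i + 1)).dropWhile PySem.Chars.isalpha := by
      rw [hrun, List.length_cons, ← lfwDropTake (t.drop (i + 1)) PySem.Chars.isalpha,
        List.drop_drop]
      congr 1
      omega
    rw [lfwTok]
    simp only [h, dif_pos, ha, if_pos]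
    rw [ih, ← hd, lfwTokL]
    simp [ha, ← hrun, hdrop]
  | case2 i h ha ih =>
    have hd : t[i] :: t.drop (i + 1) = t.drop i := List.getElem_cons_drop ..
    rw [lfwTok]
    simp only [h, dif_pos, ha]
    rw [ih, ← hd, lfwTokL]
    simp [ha]
  | case3 i h =>
    rw [lfwTok, List.drop_eq_nil_of_le (show t.length ≤ i by omega)]
    simp [h, lfwTokL]

-- min?'s accumulator step, named (so the fold can be rewritten)
def lfwStepM (f : List Char → Int) (acc : Option (List Char)) (x : List Char) : Option (List Char) :=
  match acc with
  | none => some x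
  | some n => if f x < f n then some x else some n

theorem min?_eq_foldl_stepM (f : List Char → Int) (l : List (List Char)) :
    PySem.List.min? l f = l.foldl (lfwStepM f) none := by
  unfold PySem.List.min?
  congr 1
  funext acc x
  cases acc <;> rfl

-- min?'s accumulator never returns to none
theorem lfwMinFold_some (f : List Char → Int) (l : List (List Char)) :
    ∀ (m : List Char), ∃ n, l.foldl (lfwStepM f) (some m) = some n := by
  induction l with
  | nil => intro m; exact ⟨m, rfl⟩
  | cons x l ih =>
    intro m
    simp only [List.foldl_cons]
    by_cases h : f x < f m
    · rw [show lfwStepM f (some m) x = some x from by simp [lfwStepM, h]]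
      exact ih x
    · rw [show lfwStepM f (some m) x = some m from by simp [lfwStepM, h]]
      exact ih m

-- A's running min-scan follows min?'s accumulator step for step
theorem lfwScan_agree (f : List Char → Int) (l : List (List Char)) :
    ∀ (m n : List Char),
      l.foldl (lfwStepM f) (some m) = some n →
      l.foldl (fun (st : List Char × Option Int) w =>
        match st.2 with
        | none => (w, some (f w))
        | some mc => if f w < mc then (w, some (f w)) else st) (m, some (f m))
      = (n, some (f n)) := by
  induction l with
  | nil => intro m n h; simp_all
  | cons x l ih =>
    intro m n h
    simp only [List.foldl_cons] at h ⊢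
    by_cases hx : f x < f m
    · rw [show lfwStepM f (some m) x = some x from by simp [lfwStepM, hx]] at h
      simp only [hx, if_pos]
      exact ih x n h
    · rw [show lfwStepM f (some m) x = some m from by simp [lfwStepM, hx]] at h
      simp only [hx, if_neg, not_false_iff]
      exact ih m n h

-- A's min-scan over the keys returns the first minimizer computed by min?
theorem lfwScan_fst (f : List Char → Int) (l : List (List Char)) :
    (l.foldl (fun (st : List Char × Option Int) w =>
        match st.2 with
        | none => (w, some (f w))
        | some mc => if f w < mc then (w, some (f w)) else st) ([], none)).1
      = (PySem.List.min? l f).getD [] := by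
  cases l with
  | nil => rfl
  | cons x l =>
    obtain ⟨n, hn⟩ := lfwMinFold_some f l x
    rw [min?_eq_foldl_stepM]
    simp only [List.foldl_cons]
    show (l.foldl _ (x, some (f x))).1 = (l.foldl (lfwStepM f) (some x)).getD []
    rw [lfwScan_agree f l x n hn, hn]
    rfl

-- String.ofList of the default-[] extraction is the none-guarded extraction
theorem lfwOut (X : Option (List Char)) :
    String.ofList (X.getD []) = X.elim "" String.ofList := by
  cases X <;> rfl

-- ===== VERDICT (by name: the statement is the Claim_ definition above) =====
theorem least_frequent_word_spec : Claim_equal_least_frequent_word := by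
  intro text _
  unfold Spec_least_frequent_word least_frequent_word least_frequent_word_alt lfwWordFrequency
  have hfun : lfwBump = fun d w => d.insert w (d.getD w 0 + 1) := by
    funext d w; exact lfwBump_eq d w
  have htok : (let st := lfwLoop PySem.Dict.empty [] (PySem.Chars.lower text.toList);
      if st.2 ≠ [] then lfwBump st.1 st.2 else st.1)
      = (lfwTokL (PySem.Chars.lower text.toList)).foldl lfwBump PySem.Dict.empty := by
    simpa using lfwLoop_flush (PySem.Chars.lower text.toList) PySem.Dict.empty []
  dsimp only
  rw [htok, lfwTok_eq_tokL, List.drop_zero, hfun, lfwScan_fst, lfwOut]
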